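-- pv_equiv track=rewrite | github.com/xuefly09/Python | ps4pr3.py | bitwise_and
-- ===== SOURCE A (Python) =====
-- def bitwise_and(b1, b2):
--     if len(b1) == 0:
--         return len(b2)*'0'
--     elif len(b2) == 0:
--         return len(b1)*'0'
--     else:
--         res_bitwise = bitwise_and(b1[:-1], b2[:-1])
--         if b1[-1] == '1' and b2[-1] == '1':
--             return res_bitwise + '1'
--         else:
--             return res_bitwise + '0'
-- ===== SOURCE B (Python) =====
-- def bitwise_and(b1, b2):
--     n = max(len(b1), len(b2))
--     p1 = b1.rjust(n, '0')
--     p2 = b2.rjust(n, '0')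
--     return ''.join('1' if x == '1' and y == '1' else '0' for x, y in zip(p1, p2))
-- ===== Notes on version B (the rewrite author's own statement) =====
-- stated objective: simpler
-- what changed: Replaces A's right-to-left recursion (stripping the last character of both strings each step) with a single pass: left-pad both strings with '0' to the max length and zip them, emitting '1' exactly where both characters are '1'.
import Mathlib
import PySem

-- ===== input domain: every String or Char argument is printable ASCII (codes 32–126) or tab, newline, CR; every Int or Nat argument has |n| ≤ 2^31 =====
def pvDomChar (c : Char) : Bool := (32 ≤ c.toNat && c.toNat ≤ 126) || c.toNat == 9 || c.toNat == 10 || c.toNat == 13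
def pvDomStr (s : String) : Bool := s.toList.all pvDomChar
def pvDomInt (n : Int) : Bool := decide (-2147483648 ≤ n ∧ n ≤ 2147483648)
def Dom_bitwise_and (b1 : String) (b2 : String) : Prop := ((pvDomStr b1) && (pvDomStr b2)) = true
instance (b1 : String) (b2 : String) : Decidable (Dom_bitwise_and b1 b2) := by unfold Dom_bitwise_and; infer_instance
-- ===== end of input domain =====

-- B replaces A's right-to-left recursion with a single zip over the two strings left-padded with '0' (objective: simpler).

-- ===== PORT A =====
-- literal recursion of A over the code points; b1[:-1] is PySem.List.slice … (some (-1)), b1[-1] is PySem.List.pyGet? … (-1)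
def bitAndRecAux (c1 c2 : List Char) : List Char :=
  if c1.length = 0 then List.replicate c2.length '0'          -- len(b2)*'0'
  else if c2.length = 0 then List.replicate c1.length '0'     -- len(b1)*'0'
  else
    let res := bitAndRecAux (PySem.List.slice c1 none (some (-1))) (PySem.List.slice c2 none (some (-1)))
    if PySem.List.pyGet? c1 (-1) = some '1' ∧ PySem.List.pyGet? c2 (-1) = some '1'
    then res ++ ['1'] else res ++ ['0']
termination_by c1.length
decreasing_by
  simp only [PySem.List.slice_to_neg_one, List.length_dropLast]
  omega

def bitwise_and (b1 : String) (b2 : String) : String :=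
  String.mk (bitAndRecAux b1.toList b2.toList)

-- ===== PORT B =====
def bitChar (x y : Char) : Char := if x = '1' ∧ y = '1' then '1' else '0'

-- s.rjust n '0'
def padLeft (n : Nat) (l : List Char) : List Char := List.replicate (n - l.length) '0' ++ l

def bitwise_and_alt (b1 : String) (b2 : String) : String :=
  let n := max b1.toList.length b2.toList.length
  String.mk (List.zipWith bitChar (padLeft n b1.toList) (padLeft n b2.toList))

-- ===== PRECONDITION & SPEC =====
def Spec_bitwise_and (b1 : String) (b2 : String) (out : String) : Prop := out = bitwise_and_alt b1 b2
instance (b1 : String) (b2 : String) (out : String) : Decidable (Spec_bitwise_and b1 b2 out) := by unfold Spec_bitwise_and; infer_instance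

-- ===== CLAIM (what is proved, stated in full; the proofs are below) =====
def Claim_equal_bitwise_and : Prop := ∀ (b1 : String) (b2 : String), Dom_bitwise_and b1 b2 → Spec_bitwise_and b1 b2 (bitwise_and b1 b2)

-- ===== LEMMAS AND PROOFS =====

lemma bitChar_zero_left (y : Char) : bitChar '0' y = '0' := by
  simp [bitChar]

lemma bitChar_zero_right (x : Char) : bitChar x '0' = '0' := by
  simp [bitChar]

lemma zip_zero_left (l : List Char) :
    List.zipWith bitChar (List.replicate l.length '0') l = List.replicate l.length '0' := by
  induction l with
  | nil => rfl
  | cons a t ih => simp [List.replicate_succ, bitChar_zero_left, ih]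

lemma zip_zero_right (l : List Char) :
    List.zipWith bitChar l (List.replicate l.length '0') = List.replicate l.length '0' := by
  induction l with
  | nil => rfl
  | cons a t ih => simp [List.replicate_succ, bitChar_zero_right, ih]

lemma padLeft_length (n : Nat) (l : List Char) (h : l.length ≤ n) :
    (padLeft n l).length = n := by
  simp [padLeft]; omega

lemma pad_snoc (n : Nat) (l : List Char) (x : Char) (h : l.length + 1 ≤ n) :
    padLeft n (l ++ [x]) = padLeft (n - 1) l ++ [x] := by
  have e : n - (l.length + 1) = (n - 1) - l.length := by omega
  simp [padLeft, List.append_assoc, e]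

lemma rhs_step (d1 d2 : List Char) (x y : Char) :
    List.zipWith bitChar (padLeft (max (d1 ++ [x]).length (d2 ++ [y]).length) (d1 ++ [x]))
        (padLeft (max (d1 ++ [x]).length (d2 ++ [y]).length) (d2 ++ [y]))
      = List.zipWith bitChar (padLeft (max d1.length d2.length) d1)
          (padLeft (max d1.length d2.length) d2) ++ [bitChar x y] := by
  have hl1 : (d1 ++ [x]).length = d1.length + 1 := by simp
  have hl2 : (d2 ++ [y]).length = d2.length + 1 := by simp
  set n := max (d1 ++ [x]).length (d2 ++ [y]).length with hn
  have hm : n - 1 = max d1.length d2.length := by rw [hn, hl1, hl2]; omega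
  rw [pad_snoc n d1 x (by rw [hn, hl1, hl2]; omega), pad_snoc n d2 y (by rw [hn, hl1, hl2]; omega), hm]
  have hlen : (padLeft (max d1.length d2.length) d1).length
      = (padLeft (max d1.length d2.length) d2).length := by
    rw [padLeft_length _ _ (by omega), padLeft_length _ _ (by omega)]
  rw [List.zipWith_append hlen]
  rfl

lemma bitAndRecAux_eq (c1 c2 : List Char) :
    bitAndRecAux c1 c2 =
      List.zipWith bitChar (padLeft (max c1.length c2.length) c1)
        (padLeft (max c1.length c2.length) c2) := by
  induction c1, c2 using bitAndRecAux.induct with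
  | case1 c1 c2 h1 =>
    have e1 : c1 = [] := by simpa using h1
    subst e1
    rw [bitAndRecAux]
    simp [padLeft, zip_zero_left]
  | case2 c1 c2 h1 h2 =>
    have e2 : c2 = [] := by simpa using h2
    subst e2
    rw [bitAndRecAux]
    simp [h1, padLeft, zip_zero_right]
  | case3 c1 c2 h1 h2 hcond ih =>
    have hc1 : c1 ≠ [] := by intro h; simp [h] at h1
    have hc2 : c2 ≠ [] := by intro h; simp [h] at h2
    rw [bitAndRecAux]
    simp only [h1, h2, if_false, PySem.List.slice_to_neg_one, PySem.List.pyGet?_neg_one] at ih hcond ⊢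
    obtain ⟨d1, x, e1⟩ : ∃ d x, c1 = d ++ [x] := ⟨c1.dropLast, c1.getLast hc1, (List.dropLast_append_getLast hc1).symm⟩
    obtain ⟨d2, y, e2⟩ : ∃ d y, c2 = d ++ [y] := ⟨c2.dropLast, c2.getLast hc2, (List.dropLast_append_getLast hc2).symm⟩
    subst e1; subst e2
    simp only [List.dropLast_concat] at ih ⊢
    have hx : x = '1' := by simpa using hcond.1
    have hy : y = '1' := by simpa using hcond.2
    rw [if_pos hcond, ih, rhs_step, hx, hy]
    rfl
  | case4 c1 c2 h1 h2 hcond ih =>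
    have hc1 : c1 ≠ [] := by intro h; simp [h] at h1
    have hc2 : c2 ≠ [] := by intro h; simp [h] at h2
    rw [bitAndRecAux]
    simp only [h1, h2, if_false, PySem.List.slice_to_neg_one, PySem.List.pyGet?_neg_one] at ih hcond ⊢
    obtain ⟨d1, x, e1⟩ : ∃ d x, c1 = d ++ [x] := ⟨c1.dropLast, c1.getLast hc1, (List.dropLast_append_getLast hc1).symm⟩
    obtain ⟨d2, y, e2⟩ : ∃ d y, c2 = d ++ [y] := ⟨c2.dropLast, c2.getLast hc2, (List.dropLast_append_getLast hc2).symm⟩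
    subst e1; subst e2
    simp only [List.dropLast_concat] at ih ⊢
    have hxy : ¬ (x = '1' ∧ y = '1') := by
      intro h; exact hcond (by simp [h.1, h.2])
    rw [if_neg hcond, ih, rhs_step]
    simp [bitChar, hxy]

-- ===== VERDICT (by name: the statement is the Claim_ definition above) =====
theorem bitwise_and_spec : Claim_equal_bitwise_and := by
  intro b1 b2 _
  unfold Spec_bitwise_and bitwise_and bitwise_and_alt
  rw [bitAndRecAux_eq]
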